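-- pv_equiv track=rewrite | github.com/chadfraser/Kattis-solutions | (Py3)-Coast-Length.py | iterate_sea_tiles
-- ===== SOURCE A (Python) =====
-- def iterate_sea_tiles(map_array):
--     unvisited_sea_coordinates = {(0, 0)}
--     total_sea_coast_count = 0
--     # We use offsets to avoid index out of bounds errors
--     offsets = [(-1, 0), (1, 0), (0, -1), (0, 1)]
--     # Iterate through our set of unvisited sea tiles until it is empty (i.e., we've visited every sea tile)
--     while unvisited_sea_coordinates:
--
--         # Pop an arbitrary coordinate tuple from our set, and change that coordinate's value on the 2D array to '2'
--         # (To represent it having been visited already)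
--         y_position, x_position = unvisited_sea_coordinates.pop()
--         map_array[y_position][x_position] = 2
--         for offset in offsets:
--             target_location = (y_position + offset[0], x_position + offset[1])
--
--             # If the index would put us out of bounds, do not try to visit that location, and skip to the next
--             # neighbor
--             if not 0 <= target_location[0] < len(map_array) or not 0 <= target_location[1] < len(map_array[0]):
--                 continue
--             else:
--                 # If the neighbor is a 0, we add it to the list of unvisited sea tiles
--                 if map_array[target_location[0]][target_location[1]] == 0 \
--                         and (target_location[0], target_location[1]) not in unvisited_sea_coordinates:
--                     unvisited_sea_coordinates.add((target_location[0], target_location[1]))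
--                 # If the neighbor is a 1, we increment our total sea coastline by 1
--                 elif map_array[target_location[0]][target_location[1]] == 1:
--                     total_sea_coast_count += 1
--     return total_sea_coast_count
-- ===== SOURCE B (Python) =====
-- def iterate_sea_tiles(map_array):
--     height, width = len(map_array), len(map_array[0])
--     # Phase 1: flood-fill the sea region connected to (0, 0), marking visited cells as 2.
--     # (Mutates map_array in place, like the original.)
--     region = []
--     unvisited = {(0, 0)}
--     while unvisited:
--         y, x = unvisited.pop()
--         region.append((y, x))
--         map_array[y][x] = 2
--         for ny, nx in ((y - 1, x), (y + 1, x), (y, x - 1), (y, x + 1)):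
--             if 0 <= ny < height and 0 <= nx < width \
--                     and map_array[ny][nx] == 0 and (ny, nx) not in unvisited:
--                 unvisited.add((ny, nx))
--     # Phase 2: count coast edges from the land side: for every land cell of the
--     # width-by-height rectangle, count its neighbors that belong to the region.
--     total = 0
--     for y in range(height):
--         for x in range(width):
--             if map_array[y][x] == 1:
--                 total += sum(1 for p in ((y - 1, x), (y + 1, x), (y, x - 1), (y, x + 1))
--                              if p in region)
--     return total
-- ===== Notes on version B (the rewrite author's own statement) =====
-- stated objective: alternative
-- what changed: A interleaves coast counting with the flood fill (counting land neighbors from the sea side while popping each sea cell); B splits the work into a pure flood-fill phase that only marks the region, followed by a separate rectangle scan that counts coast edges from the land side (for each land cell, how many of its neighbors are region cells), which equals A's count because each sea/land adjacency is counted exactly once from either side.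
-- outside the precondition, e.g. on iterate_sea_tiles([[0, 1], [1]]): A returns 2, B raises IndexError
import Mathlib
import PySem

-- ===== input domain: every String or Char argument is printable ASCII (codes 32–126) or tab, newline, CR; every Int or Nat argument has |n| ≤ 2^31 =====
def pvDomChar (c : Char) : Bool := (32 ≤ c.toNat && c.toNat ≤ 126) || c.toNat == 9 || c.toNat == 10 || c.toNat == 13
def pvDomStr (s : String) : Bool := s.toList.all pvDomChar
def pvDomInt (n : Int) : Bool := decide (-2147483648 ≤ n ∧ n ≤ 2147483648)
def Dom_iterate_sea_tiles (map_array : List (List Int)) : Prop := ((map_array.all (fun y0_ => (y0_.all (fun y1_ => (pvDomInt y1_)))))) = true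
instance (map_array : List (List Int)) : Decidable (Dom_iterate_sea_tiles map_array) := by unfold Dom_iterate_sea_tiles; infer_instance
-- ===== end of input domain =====

-- B replaces A's count-while-flood-filling by a marking-only flood fill followed by a separate
-- land-side rectangle scan; equivalence is about the RETURN value (both mutate the grid identically).

-- ===== PORT A =====
-- width = len(map_array[0])
def pvW (g : List (List Int)) : Nat := (g.headD []).length
-- map_array[y][x] for 0 <= y,x (exact where the bounds checks of the source guarantee the index in range)
def pvGet (g : List (List Int)) (y x : Int) : Int := (g.getD y.toNat []).getD x.toNat 0
-- map_array[y][x] = 2 (in-place write, exact under the same bounds checks)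
def pvSet2 (g : List (List Int)) (y x : Int) : List (List Int) :=
  g.set y.toNat ((g.getD y.toNat []).set x.toNat 2)

def pvOffsets : List (Int × Int) := [(-1, 0), (1, 0), (0, -1), (0, 1)]

-- body of A's `for offset in offsets` loop, acting on (unvisited, total) exactly as the source:
-- bounds-continue, then `== 0 and not in` -> add, `elif == 1` -> count
def stepA (g : List (List Int)) (y x : Int) (sc : List (Int × Int) × Int) (od : Int × Int) :
    List (Int × Int) × Int :=
  let t : Int × Int := (y + od.1, x + od.2)
  if ¬ (0 ≤ t.1 ∧ t.1 < (g.length : Int)) ∨ ¬ (0 ≤ t.2 ∧ t.2 < (pvW g : Int)) then sc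
  else if pvGet g t.1 t.2 = 0 ∧ ¬ t ∈ sc.1 then (sc.1 ++ [t], sc.2)
  else if pvGet g t.1 t.2 = 1 then (sc.1, sc.2 + 1)
  else sc

-- A's while loop; the unvisited set is a list of distinct coordinates, `pop` takes the head
-- (Python's set.pop is order-arbitrary and A's result is order-independent); fuel 2*H*W+2
-- exceeds the number of iterations (each in-bounds cell is popped at most once)
def loopA : Nat → List (List Int) → List (Int × Int) → Int → Int
  | 0, _, _, c => c
  | f + 1, g, s, c =>
    match s with
    | [] => c
    | (y, x) :: rest =>
      let g' := pvSet2 g y x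
      let sc := pvOffsets.foldl (stepA g' y x) (rest, c)
      loopA f g' sc.1 sc.2

def iterate_sea_tiles (map_array : List (List Int)) : Int :=
  loopA (2 * map_array.length * pvW map_array + 2) map_array [(0, 0)] 0

-- ===== PORT B =====
-- the four neighbor tuples ((y-1,x),(y+1,x),(y,x-1),(y,x+1)) of Source B
def pvNbrs (y x : Int) : List (Int × Int) := [(y - 1, x), (y + 1, x), (y, x - 1), (y, x + 1)]

-- body of phase 1's neighbor loop: add the neighbor if in bounds, still 0, and not waiting already
def stepB (g : List (List Int)) (s : List (Int × Int)) (t : Int × Int) : List (Int × Int) :=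
  if 0 ≤ t.1 ∧ t.1 < (g.length : Int) ∧ 0 ≤ t.2 ∧ t.2 < (pvW g : Int) ∧
      pvGet g t.1 t.2 = 0 ∧ ¬ t ∈ s
  then s ++ [t] else s

-- phase 1: marking-only flood fill; returns (final grid, region).  `region` is a Python set whose
-- added elements are pairwise distinct (a popped cell is marked 2 and never popped again), so the
-- port keeps it as a list with append; worklist popped at the head as in port A.
def loopB : Nat → List (List Int) → List (Int × Int) → List (Int × Int) →
    List (List Int) × List (Int × Int)
  | 0, g, _, reg => (g, reg)
  | f + 1, g, s, reg =>
    match s with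
    | [] => (g, reg)
    | (y, x) :: rest =>
      let g' := pvSet2 g y x
      loopB f g' ((pvNbrs y x).foldl (stepB g') rest) (reg ++ [(y, x)])

-- phase 2: land-side scan of the height-by-width rectangle
def scanB (hh ww : Nat) (g : List (List Int)) (reg : List (Int × Int)) : Int :=
  (List.range hh).foldl (fun tot (y : Nat) =>
    (List.range ww).foldl (fun tot (x : Nat) =>
      if pvGet g (y : Int) (x : Int) = 1 then
        tot + (pvNbrs (y : Int) (x : Int)).foldl (fun k p => if p ∈ reg then k + 1 else k) 0
      else tot) tot) 0

def iterate_sea_tiles_alt (map_array : List (List Int)) : Int :=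
  let res := loopB (2 * map_array.length * pvW map_array + 2) map_array [(0, 0)] []
  scanB map_array.length (pvW map_array) res.1 res.2

-- ===== PRECONDITION & SPEC =====
-- Pre_ excludes the empty map and the empty first row (A raises IndexError at (0,0)) and ragged
-- maps with a row shorter than the first row: on those the fill or the scan can raise IndexError,
-- and whether A returns at all depends on which cells the fill happens to reach.
def Pre_iterate_sea_tiles (map_array : List (List Int)) : Prop :=
  map_array ≠ [] ∧ 0 < pvW map_array ∧ ∀ row ∈ map_array, pvW map_array ≤ row.length
instance (map_array : List (List Int)) : Decidable (Pre_iterate_sea_tiles map_array) := by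
  unfold Pre_iterate_sea_tiles; infer_instance

def pvWitness_iterate_sea_tiles : List (List Int) := [[0, 1], [1, 0]]

def Spec_iterate_sea_tiles (map_array : List (List Int)) (out : Int) : Prop := out = iterate_sea_tiles_alt map_array
instance (map_array : List (List Int)) (out : Int) : Decidable (Spec_iterate_sea_tiles map_array out) := by unfold Spec_iterate_sea_tiles; infer_instance

-- ===== CLAIM (what is proved, stated in full; the proofs are below) =====
def Claim_equal_iterate_sea_tiles : Prop := ∀ (map_array : List (List Int)), Dom_iterate_sea_tiles map_array → Pre_iterate_sea_tiles map_array → Spec_iterate_sea_tiles map_array (iterate_sea_tiles map_array)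

-- ===== LEMMAS AND PROOFS =====

-- cell (y,x) lies in the hh-by-ww rectangle
abbrev InRect (hh ww : Nat) (y x : Int) : Prop :=
  0 ≤ y ∧ y < (hh : Int) ∧ 0 ≤ x ∧ x < (ww : Int)

-- the grid keeps its dimensions throughout the fill
def Shape (hh ww : Nat) (g : List (List Int)) : Prop :=
  0 < hh ∧ 0 < ww ∧ g.length = hh ∧ pvW g = ww ∧ ∀ row ∈ g, ww ≤ row.length

-- steady-state invariant of the fill loops
def FillInv (hh ww : Nat) (g : List (List Int)) (s : List (Int × Int)) : Prop :=
  Shape hh ww g ∧ s.Nodup ∧ ∀ q ∈ s, InRect hh ww q.1 q.2 ∧ pvGet g q.1 q.2 = 0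

-- number of in-rectangle land neighbors of p in grid g (what A adds when popping p)
def cellCnt (hh ww : Nat) (g : List (List Int)) (p : Int × Int) : Int :=
  (pvOffsets.map (fun od =>
    if InRect hh ww (p.1 + od.1) (p.2 + od.2) ∧ pvGet g (p.1 + od.1) (p.2 + od.2) = 1
    then (1 : Int) else 0)).sum

theorem pvW_set (g : List (List Int)) (y x : Int) (hg : g ≠ []) :
    pvW (pvSet2 g y x) = pvW g := by
  unfold pvW pvSet2
  cases g with
  | nil => simp at hg
  | cons a l =>
    cases hn : y.toNat with
    | zero => simp [hn]
    | succ n => simp [hn]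

theorem shape_set (hh ww : Nat) (g : List (List Int)) (y x : Int)
    (h : Shape hh ww g) : Shape hh ww (pvSet2 g y x) := by
  obtain ⟨h1, h2, h3, h4, h5⟩ := h
  have hg : g ≠ [] := by intro he; rw [he] at h3; simp at h3; omega
  refine ⟨h1, h2, by simpa [pvSet2] using h3, by rw [pvW_set g y x hg]; exact h4, ?_⟩
  intro row hrow
  simp only [pvSet2] at hrow
  rcases List.mem_or_eq_of_mem_set hrow with hm | he
  · exact h5 row hm
  · subst he
    rw [List.length_set]
    by_cases hy : y.toNat < g.length
    · have : g.getD y.toNat [] = g[y.toNat] := List.getD_eq_getElem g [] hy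
      rw [this]
      exact h5 _ (List.getElem_mem hy)
    · -- out of range: the written row is ([]).set x 2 = [] and the outer set is a no-op
      have hd : g.getD y.toNat [] = [] := List.getD_eq_default g [] (by omega)
      have hset : g.set y.toNat ((g.getD y.toNat []).set x.toNat 2) = g :=
        List.set_eq_of_length_le (by omega)
      rw [hset] at hrow
      rw [hd] at hrow ⊢
      simp only [List.set_nil] at hrow ⊢
      simpa using h5 _ hrow

theorem pvGet_set (hh ww : Nat) (g : List (List Int)) (y x qy qx : Int)
    (hs : Shape hh ww g) (hin : InRect hh ww y x) (hqy : 0 ≤ qy) (hqx : 0 ≤ qx) :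
    pvGet (pvSet2 g y x) qy qx = if qy = y ∧ qx = x then 2 else pvGet g qy qx := by
  obtain ⟨hh0, hw0, hlen, hwid, hrows⟩ := hs
  obtain ⟨hy0, hyH, hx0, hxW⟩ := hin
  have hyy : y.toNat < g.length := by omega
  have hrow : g.getD y.toNat [] = g[y.toNat] := List.getD_eq_getElem g [] hyy
  have hwlen : ww ≤ (g[y.toNat]).length := hrows _ (List.getElem_mem hyy)
  have hxx : x.toNat < (g[y.toNat]).length := by omega
  by_cases hqy : qy = y
  · by_cases hqx : qx = x
    · rw [if_pos ⟨hqy, hqx⟩, hqy, hqx]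
      simp [pvGet, pvSet2, List.getD_eq_getElem?_getD, List.getElem?_set, hyy, hxx, hrow,
        List.getElem?_eq_getElem]
    · rw [if_neg (by tauto)]
      have hne : x.toNat ≠ qx.toNat := by omega
      rw [hqy]
      simp [pvGet, pvSet2, List.getD_eq_getElem?_getD, List.getElem?_set, hyy, hne, hrow,
        List.getElem?_eq_getElem]
  · rw [if_neg (by tauto)]
    have hne : y.toNat ≠ qy.toNat := by omega
    simp [pvGet, pvSet2, List.getD_eq_getElem?_getD, List.getElem?_set, hne]

theorem pvGet_set_self (hh ww : Nat) (g : List (List Int)) (y x : Int)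
    (hs : Shape hh ww g) (hin : InRect hh ww y x) :
    pvGet (pvSet2 g y x) y x = 2 := by
  rw [pvGet_set hh ww g y x y x hs hin hin.1 hin.2.2.1]; simp

-- = fold of stepB: membership characterization, monotonicity, nodup
theorem stepB_fold_mem (g : List (List Int)) (l : List (Int × Int)) (s : List (Int × Int))
    (q : Int × Int) (hq : q ∈ l.foldl (stepB g) s) :
    q ∈ s ∨ (InRect g.length (pvW g) q.1 q.2 ∧ pvGet g q.1 q.2 = 0) := by
  induction l generalizing s with
  | nil => exact Or.inl hq
  | cons t l ih =>
    rcases ih _ hq with h | h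
    · unfold stepB at h
      split_ifs at h with hc
      · rcases List.mem_append.1 h with h | h
        · exact Or.inl h
        · simp at h
          subst h
          exact Or.inr ⟨⟨hc.1, hc.2.1, hc.2.2.1, hc.2.2.2.1⟩, hc.2.2.2.2.1⟩
      · exact Or.inl h
    · exact Or.inr h

theorem stepB_fold_nodup (g : List (List Int)) (l : List (Int × Int)) (s : List (Int × Int))
    (hs : s.Nodup) : (l.foldl (stepB g) s).Nodup := by
  induction l generalizing s with
  | nil => exact hs
  | cons t l ih =>
    apply ih
    unfold stepB
    split_ifs with hc
    · rw [List.nodup_append]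
      refine ⟨hs, List.nodup_singleton _, ?_⟩
      intro a ha b hb
      simp only [List.mem_singleton] at hb
      subst hb
      rintro rfl
      exact hc.2.2.2.2.2 ha
    · exact hs

-- the worklist component of A's neighbor fold is B's neighbor fold
theorem fold_fst (g : List (List Int)) (y x : Int) (sc : List (Int × Int) × Int) :
    (pvOffsets.foldl (stepA g y x) sc).1 = (pvNbrs y x).foldl (stepB g) sc.1 := by
  have hnb : pvNbrs y x = pvOffsets.map (fun od => (y + od.1, x + od.2)) := by
    simp [pvNbrs, pvOffsets, sub_eq_add_neg]
  rw [hnb, List.foldl_map]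
  have hstep : ∀ (sc : List (Int × Int) × Int) (od : Int × Int),
      (stepA g y x sc od).1 = stepB g sc.1 (y + od.1, x + od.2) := by
    intro sc od
    by_cases hb1 : 0 ≤ y + od.1 ∧ y + od.1 < (g.length : Int)
      <;> by_cases hb2 : 0 ≤ x + od.2 ∧ x + od.2 < ((pvW g : Nat) : Int)
      <;> by_cases hv0 : pvGet g (y + od.1) (x + od.2) = 0
      <;> by_cases hm : (y + od.1, x + od.2) ∈ sc.1
      <;> simp only [stepA, stepB]
      <;> split_ifs
      <;> first | rfl | tauto | simp_all | omega
  clear hnb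
  induction pvOffsets generalizing sc with
  | nil => rfl
  | cons od l ih => rw [List.foldl_cons, List.foldl_cons, ih, hstep]

-- the counter component of A's neighbor fold adds cellCnt
theorem fold_snd (hh ww : Nat) (g : List (List Int)) (y x : Int) (sc : List (Int × Int) × Int)
    (hs : Shape hh ww g) :
    (pvOffsets.foldl (stepA g y x) sc).2 = sc.2 + cellCnt hh ww g (y, x) := by
  obtain ⟨hh0, hw0, hlen, hwid, hrows⟩ := hs
  have hstep : ∀ (sc : List (Int × Int) × Int) (od : Int × Int),
      (stepA g y x sc od).2 = sc.2 +
        (if InRect hh ww (y + od.1) (x + od.2) ∧ pvGet g (y + od.1) (x + od.2) = 1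
         then (1 : Int) else 0) := by
    intro sc od
    unfold stepA
    have e1 : ((g.length : Nat) : Int) = (hh : Int) := by rw [hlen]
    have e2 : ((pvW g : Nat) : Int) = (ww : Int) := by rw [hwid]
    simp only [InRect, e1, e2]
    split_ifs <;> simp_all <;> omega
  unfold cellCnt
  induction pvOffsets generalizing sc with
  | nil => simp
  | cons od l ih =>
    rw [List.foldl_cons, ih, hstep]
    simp
    ring

-- loopB's region accumulator
theorem loopB_acc (f : Nat) (g : List (List Int)) (s reg : List (Int × Int)) :
    loopB f g s reg = ((loopB f g s []).1, reg ++ (loopB f g s []).2) := by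
  induction f generalizing g s reg with
  | zero => simp [loopB]
  | succ f ih =>
    cases s with
    | nil => simp [loopB]
    | cons p rest =>
      obtain ⟨y, x⟩ := p
      have hstep : ∀ r, loopB (f + 1) g ((y, x) :: rest) r =
          loopB f (pvSet2 g y x) ((pvNbrs y x).foldl (stepB (pvSet2 g y x)) rest)
            (r ++ [(y, x)]) := fun _ => rfl
      rw [hstep, hstep, ih, ih (reg := [] ++ [(y, x)])]
      simp

theorem inv_step (hh ww : Nat) (g : List (List Int)) (y x : Int) (rest : List (Int × Int))
    (h : FillInv hh ww g ((y, x) :: rest)) :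
    FillInv hh ww (pvSet2 g y x) ((pvNbrs y x).foldl (stepB (pvSet2 g y x)) rest) := by
  obtain ⟨hshape, hnd, hmem⟩ := h
  have hshape' := shape_set hh ww g y x hshape
  refine ⟨hshape', (stepB_fold_nodup _ _ _ (hnd.of_cons)), ?_⟩
  intro q hq
  rcases stepB_fold_mem _ _ _ _ hq with hqs | ⟨hir, hv⟩
  · have hq' := hmem q (List.mem_cons_of_mem _ hqs)
    refine ⟨hq'.1, ?_⟩
    have hne : q ≠ (y, x) := by
      intro he
      subst he
      exact (List.nodup_cons.1 hnd).1 hqs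
    have hyx := hmem (y, x) List.mem_cons_self
    rw [pvGet_set hh ww g y x q.1 q.2 hshape hyx.1 hq'.1.1 hq'.1.2.2.1]
    have : ¬ (q.1 = y ∧ q.2 = x) := by
      intro hc
      exact hne (Prod.ext hc.1 hc.2)
    rw [if_neg this]
    exact hq'.2
  · obtain ⟨hs1, hs2, hs3, hs4, hs5⟩ := hshape'
    rw [hs3, hs4] at hir
    exact ⟨hir, hv⟩

-- every popped cell is in the rectangle and was waiting or still 0
theorem popped_mem (hh ww : Nat) (f : Nat) (g : List (List Int)) (s : List (Int × Int))
    (h : FillInv hh ww g s) (q : Int × Int) (hq : q ∈ (loopB f g s []).2) :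
    InRect hh ww q.1 q.2 ∧ (q ∈ s ∨ pvGet g q.1 q.2 = 0) := by
  induction f generalizing g s with
  | zero => simp [loopB] at hq
  | succ f ih =>
    cases s with
    | nil => simp [loopB] at hq
    | cons p rest =>
      obtain ⟨y, x⟩ := p
      have hyx := h.2.2 (y, x) List.mem_cons_self
      have hval2 : pvGet (pvSet2 g y x) y x = 2 := pvGet_set_self hh ww g y x h.1 hyx.1
      have hinv' := inv_step hh ww g y x rest h
      have hunf : loopB (f + 1) g ((y, x) :: rest) [] =
          ((loopB f (pvSet2 g y x) ((pvNbrs y x).foldl (stepB (pvSet2 g y x)) rest) []).1,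
            (y, x) :: (loopB f (pvSet2 g y x) ((pvNbrs y x).foldl (stepB (pvSet2 g y x)) rest) []).2) := by
        have he : loopB (f + 1) g ((y, x) :: rest) [] =
            loopB f (pvSet2 g y x) ((pvNbrs y x).foldl (stepB (pvSet2 g y x)) rest) ([] ++ [(y, x)]) := rfl
        rw [he, loopB_acc]
        simp
      rw [hunf] at hq
      rcases List.mem_cons.1 hq with rfl | hq'
      · exact ⟨hyx.1, Or.inl List.mem_cons_self⟩
      · obtain ⟨hir, hrest⟩ := ih _ _ hinv' hq'
        refine ⟨hir, ?_⟩
        have hval0 : q ∈ rest ∨ pvGet (pvSet2 g y x) q.1 q.2 = 0 := by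
          rcases hrest with hqs | hv
          · rcases stepB_fold_mem _ _ _ _ hqs with hqr | ⟨_, hv⟩
            · exact Or.inl hqr
            · exact Or.inr hv
          · exact Or.inr hv
        rcases hval0 with hqr | hv
        · exact Or.inl (List.mem_cons_of_mem _ hqr)
        · have hne : ¬ (q.1 = y ∧ q.2 = x) := by
            rintro ⟨e1, e2⟩
            rw [e1, e2] at hv
            omega
          rw [pvGet_set hh ww g y x q.1 q.2 h.1 hyx.1 hir.1 hir.2.2.1, if_neg hne] at hv
          exact Or.inr hv


theorem popped_nodup (hh ww : Nat) (f : Nat) (g : List (List Int)) (s : List (Int × Int))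
    (h : FillInv hh ww g s) : (loopB f g s []).2.Nodup := by
  induction f generalizing g s with
  | zero => simp [loopB]
  | succ f ih =>
    cases s with
    | nil => simp [loopB]
    | cons p rest =>
      obtain ⟨y, x⟩ := p
      have hyx := h.2.2 (y, x) List.mem_cons_self
      have hval2 : pvGet (pvSet2 g y x) y x = 2 := pvGet_set_self hh ww g y x h.1 hyx.1
      have hinv' := inv_step hh ww g y x rest h
      have hunf : loopB (f + 1) g ((y, x) :: rest) [] =
          ((loopB f (pvSet2 g y x) ((pvNbrs y x).foldl (stepB (pvSet2 g y x)) rest) []).1,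
            (y, x) :: (loopB f (pvSet2 g y x) ((pvNbrs y x).foldl (stepB (pvSet2 g y x)) rest) []).2) := by
        have he : loopB (f + 1) g ((y, x) :: rest) [] =
            loopB f (pvSet2 g y x) ((pvNbrs y x).foldl (stepB (pvSet2 g y x)) rest) ([] ++ [(y, x)]) := rfl
        rw [he, loopB_acc]
        simp
      rw [hunf]
      refine List.nodup_cons.2 ⟨?_, ih _ _ hinv'⟩
      intro hmem
      obtain ⟨_, hrest⟩ := popped_mem hh ww f _ _ hinv' (y, x) hmem
      rcases hrest with hqs | hv
      · exact absurd (hinv'.2.2 _ hqs).2 (by rw [hval2]; omega)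
      · rw [hval2] at hv
        omega

-- the final grid is the start grid with the popped cells set to 2
theorem final_val (hh ww : Nat) (f : Nat) (g : List (List Int)) (s : List (Int × Int))
    (h : FillInv hh ww g s) (qy qx : Int) (hq : InRect hh ww qy qx) :
    pvGet (loopB f g s []).1 qy qx =
      if (qy, qx) ∈ (loopB f g s []).2 then 2 else pvGet g qy qx := by
  induction f generalizing g s with
  | zero => simp [loopB]
  | succ f ih =>
    cases s with
    | nil => simp [loopB]
    | cons p rest =>
      obtain ⟨y, x⟩ := p
      have hyx := h.2.2 (y, x) List.mem_cons_self
      have hval2 : pvGet (pvSet2 g y x) y x = 2 := pvGet_set_self hh ww g y x h.1 hyx.1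
      have hinv' := inv_step hh ww g y x rest h
      have hunf : loopB (f + 1) g ((y, x) :: rest) [] =
          ((loopB f (pvSet2 g y x) ((pvNbrs y x).foldl (stepB (pvSet2 g y x)) rest) []).1,
            (y, x) :: (loopB f (pvSet2 g y x) ((pvNbrs y x).foldl (stepB (pvSet2 g y x)) rest) []).2) := by
        have he : loopB (f + 1) g ((y, x) :: rest) [] =
            loopB f (pvSet2 g y x) ((pvNbrs y x).foldl (stepB (pvSet2 g y x)) rest) ([] ++ [(y, x)]) := rfl
        rw [he, loopB_acc]
        simp
      rw [hunf]
      have hih := ih _ _ hinv'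
      dsimp only
      rw [hih]
      have hget := pvGet_set hh ww g y x qy qx h.1 hyx.1 hq.1 hq.2.2.1
      by_cases hp : (qy, qx) ∈ (loopB f (pvSet2 g y x) ((pvNbrs y x).foldl (stepB (pvSet2 g y x)) rest) []).2
      · rw [if_pos hp, if_pos (List.mem_cons_of_mem _ hp)]
      · rw [if_neg hp, hget]
        by_cases he : qy = y ∧ qx = x
        · rw [if_pos he, if_pos (by rw [List.mem_cons]; exact Or.inl (Prod.ext he.1 he.2))]
        · rw [if_neg he, if_neg ?hne]
          case hne =>
            rw [List.mem_cons]
            rintro (hc | hc)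
            · exact he ⟨congrArg Prod.fst hc, congrArg Prod.snd hc⟩
            · exact hp hc

-- land-cell counts are stable: counting against the current grid or the final grid is the same
theorem cellCnt_stable (hh ww : Nat) (f : Nat) (g : List (List Int)) (s : List (Int × Int))
    (h : FillInv hh ww g s) (p : Int × Int) :
    cellCnt hh ww g p = cellCnt hh ww (loopB f g s []).1 p := by
  unfold cellCnt
  congr 1
  apply List.map_congr_left
  intro od _
  by_cases hir : InRect hh ww (p.1 + od.1) (p.2 + od.2)
  · rw [final_val hh ww f g s h _ _ hir]
    by_cases hp : (p.1 + od.1, p.2 + od.2) ∈ (loopB f g s []).2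
    · rw [if_pos hp]
      obtain ⟨_, hrest⟩ := popped_mem hh ww f g s h _ hp
      have hv0 : pvGet g (p.1 + od.1) (p.2 + od.2) = 0 := by
        rcases hrest with hqs | hv
        · exact (h.2.2 _ hqs).2
        · exact hv
      rw [hv0]
      norm_num
    · rw [if_neg hp]
  · rw [if_neg (by tauto), if_neg (by tauto)]

-- simulation: A's loop = accumulator + per-popped-cell land counts against the final grid
theorem simA (hh ww : Nat) (f : Nat) (g : List (List Int)) (s : List (Int × Int)) (c : Int)
    (h : FillInv hh ww g s) :
    loopA f g s c = c + ((loopB f g s []).2.map (cellCnt hh ww (loopB f g s []).1)).sum := by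
  induction f generalizing g s c with
  | zero => simp [loopA, loopB]
  | succ f ih =>
    cases s with
    | nil => simp [loopA, loopB]
    | cons p rest =>
      obtain ⟨y, x⟩ := p
      have hyx := h.2.2 (y, x) List.mem_cons_self
      have hinv' := inv_step hh ww g y x rest h
      have hsh' : Shape hh ww (pvSet2 g y x) := shape_set hh ww g y x h.1
      have hunf : loopB (f + 1) g ((y, x) :: rest) [] =
          ((loopB f (pvSet2 g y x) ((pvNbrs y x).foldl (stepB (pvSet2 g y x)) rest) []).1,
            (y, x) :: (loopB f (pvSet2 g y x) ((pvNbrs y x).foldl (stepB (pvSet2 g y x)) rest) []).2) := by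
        have he : loopB (f + 1) g ((y, x) :: rest) [] =
            loopB f (pvSet2 g y x) ((pvNbrs y x).foldl (stepB (pvSet2 g y x)) rest) ([] ++ [(y, x)]) := rfl
        rw [he, loopB_acc]
        simp
      have hA : loopA (f + 1) g ((y, x) :: rest) c =
          loopA f (pvSet2 g y x)
            (pvOffsets.foldl (stepA (pvSet2 g y x) y x) (rest, c)).1
            (pvOffsets.foldl (stepA (pvSet2 g y x) y x) (rest, c)).2 := rfl
      rw [hA, fold_fst, fold_snd hh ww _ y x _ hsh', hunf]
      rw [ih _ _ _ hinv']
      dsimp only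
      rw [List.map_cons, List.sum_cons]
      rw [← cellCnt_stable hh ww f _ _ hinv']
      ring


theorem foldl_add_int {α : Type} (f : α → Int) (l : List α) (t0 : Int) :
    l.foldl (fun t a => t + f a) t0 = t0 + (l.map f).sum := by
  induction l generalizing t0 with
  | nil => simp
  | cons a l ih => rw [List.foldl_cons, ih]; simp; ring

theorem foldl_range_add_sum (n : Nat) (F : Nat → Int) (t0 : Int) :
    (List.range n).foldl (fun t i => t + F i) t0 = t0 + ∑ i ∈ Finset.range n, F i := by
  induction n with
  | zero => simp
  | succ n ih =>
    rw [List.range_succ, List.foldl_append, ih, Finset.sum_range_succ]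
    simp [add_assoc]

theorem foldl_range_ite_sum (n : Nat) (C : Nat → Prop) [DecidablePred C] (F : Nat → Int)
    (t0 : Int) :
    (List.range n).foldl (fun t i => if C i then t + F i else t) t0 =
      t0 + ∑ i ∈ Finset.range n, (if C i then F i else 0) := by
  induction n with
  | zero => simp
  | succ n ih =>
    rw [List.range_succ, List.foldl_append, ih, Finset.sum_range_succ]
    simp only [List.foldl_cons, List.foldl_nil]
    split <;> ring

-- the height-by-width rectangle as a finite set of integer coordinates
def rectF (hh ww : Nat) : Finset (Int × Int) :=
  (Finset.range hh ×ˢ Finset.range ww).image (fun ab => ((ab.1 : Int), (ab.2 : Int)))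

theorem mem_rectF (hh ww : Nat) (q : Int × Int) :
    q ∈ rectF hh ww ↔ InRect hh ww q.1 q.2 := by
  obtain ⟨qy, qx⟩ := q
  simp only [rectF, Finset.mem_image, Finset.mem_product, Finset.mem_range, InRect, Prod.ext_iff]
  constructor
  · rintro ⟨⟨a, b⟩, ⟨ha, hb⟩, h1, h2⟩
    simp at h1 h2
    omega
  · rintro ⟨h1, h2, h3, h4⟩
    exact ⟨(qy.toNat, qx.toNat), ⟨by omega, by omega⟩, by simp; omega, by simp; omega⟩

theorem sum_rectF (hh ww : Nat) (F : Int × Int → Int) :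
    ∑ q ∈ rectF hh ww, F q =
      ∑ y ∈ Finset.range hh, ∑ x ∈ Finset.range ww, F ((y : Int), (x : Int)) := by
  rw [rectF, Finset.sum_image, ← Finset.sum_product']
  intro a _ b _ h
  simp only [Prod.ext_iff] at h ⊢
  omega

-- change of counting side for one fixed offset (dy, dx)
theorem swap_sum (hh ww : Nat) (g : List (List Int)) (reg : List (Int × Int)) (dy dx : Int) :
    (∑ p ∈ reg.toFinset,
      if InRect hh ww (p.1 + dy) (p.2 + dx) ∧ pvGet g (p.1 + dy) (p.2 + dx) = 1
      then (1 : Int) else 0) =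
    ∑ q ∈ rectF hh ww,
      (if pvGet g q.1 q.2 = 1 ∧ (q.1 - dy, q.2 - dx) ∈ reg.toFinset
       then (1 : Int) else 0) := by
  rw [Finset.sum_boole, Finset.sum_boole]
  congr 1
  apply Finset.card_nbij' (i := fun p => (p.1 + dy, p.2 + dx)) (j := fun q => (q.1 - dy, q.2 - dx))
  · intro p hp
    simp only [Finset.mem_coe, Finset.mem_filter, mem_rectF] at hp ⊢
    refine ⟨hp.2.1, hp.2.2, ?_⟩
    simpa using hp.1
  · intro q hq
    simp only [Finset.mem_coe, Finset.mem_filter, mem_rectF] at hq ⊢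
    obtain ⟨hqr, hq1, hq2⟩ := hq
    refine ⟨hq2, ?_, ?_⟩
    · simpa using hqr
    · simpa using hq1
  · intro p _
    simp
  · intro q _
    simp

-- double counting: summing land neighbors over the region = the land-side rectangle scan
theorem double_count (hh ww : Nat) (g : List (List Int)) (reg : List (Int × Int))
    (hreg : reg.Nodup) :
    (reg.map (cellCnt hh ww g)).sum = scanB hh ww g reg := by
  have hk : ∀ (k : Int) (p : Int × Int),
      (if p ∈ reg then k + 1 else k) = k + (if p ∈ reg then (1 : Int) else 0) :=
    fun k p => by split <;> ring
  have h1 : ∀ (yy xx t : Int),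
      (pvNbrs yy xx).foldl (fun k p => if p ∈ reg then k + 1 else k) t
        = t + ((pvNbrs yy xx).map (fun p => if p ∈ reg then (1 : Int) else 0)).sum := by
    intro yy xx t
    rw [show (fun (k : Int) (p : Int × Int) => if p ∈ reg then k + 1 else k)
        = (fun (k : Int) (p : Int × Int) => k + (if p ∈ reg then (1 : Int) else 0)) from
      funext fun k => funext fun p => hk k p]
    exact foldl_add_int _ _ _
  have hinner : ∀ (t : Int) (y : Nat),
      (List.range ww).foldl (fun tot (x : Nat) =>
        if pvGet g (y : Int) (x : Int) = 1 then
          tot + (pvNbrs (y : Int) (x : Int)).foldl (fun k p => if p ∈ reg then k + 1 else k) 0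
        else tot) t
      = t + ∑ x ∈ Finset.range ww,
          (if pvGet g (y : Int) (x : Int) = 1 then
            ((pvNbrs (y : Int) (x : Int)).map (fun p => if p ∈ reg then (1 : Int) else 0)).sum
           else 0) := by
    intro t y
    rw [foldl_range_ite_sum ww (fun x => pvGet g (y : Int) (x : Int) = 1)
      (fun x => (pvNbrs (y : Int) (x : Int)).foldl (fun k p => if p ∈ reg then k + 1 else k) 0) t]
    congr 1
    apply Finset.sum_congr rfl
    intro x _
    split
    · rw [h1, zero_add]
    · rfl
  have hscan : scanB hh ww g reg =
      ∑ y ∈ Finset.range hh, ∑ x ∈ Finset.range ww,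
        (if pvGet g (y : Int) (x : Int) = 1 then
          ((pvNbrs (y : Int) (x : Int)).map (fun p => if p ∈ reg then (1 : Int) else 0)).sum
         else 0) := by
    unfold scanB
    rw [show (fun (tot : Int) (y : Nat) =>
        (List.range ww).foldl (fun tot (x : Nat) =>
          if pvGet g (y : Int) (x : Int) = 1 then
            tot + (pvNbrs (y : Int) (x : Int)).foldl (fun k p => if p ∈ reg then k + 1 else k) 0
          else tot) tot)
        = (fun (tot : Int) (y : Nat) => tot + ∑ x ∈ Finset.range ww,
            (if pvGet g (y : Int) (x : Int) = 1 then
              ((pvNbrs (y : Int) (x : Int)).map (fun p => if p ∈ reg then (1 : Int) else 0)).sum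
             else 0)) from
      funext fun t => funext fun y => hinner t y]
    rw [foldl_range_add_sum, zero_add]
  rw [hscan,
    ← sum_rectF hh ww (fun q =>
      if pvGet g q.1 q.2 = 1 then
        ((pvNbrs q.1 q.2).map (fun p => if p ∈ reg then (1 : Int) else 0)).sum
      else 0)]
  have e2 : ∀ q ∈ rectF hh ww,
      (if pvGet g q.1 q.2 = 1 then
        ((pvNbrs q.1 q.2).map (fun p => if p ∈ reg then (1 : Int) else 0)).sum
       else 0)
      = (if pvGet g q.1 q.2 = 1 ∧ (q.1 - 1, q.2) ∈ reg.toFinset then (1 : Int) else 0)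
        + ((if pvGet g q.1 q.2 = 1 ∧ (q.1 + 1, q.2) ∈ reg.toFinset then (1 : Int) else 0)
        + ((if pvGet g q.1 q.2 = 1 ∧ (q.1, q.2 - 1) ∈ reg.toFinset then (1 : Int) else 0)
        + (if pvGet g q.1 q.2 = 1 ∧ (q.1, q.2 + 1) ∈ reg.toFinset then (1 : Int) else 0))) := by
    intro q _
    by_cases hv : pvGet g q.1 q.2 = 1 <;> simp [pvNbrs, hv, List.mem_toFinset]
  rw [Finset.sum_congr rfl e2, Finset.sum_add_distrib, Finset.sum_add_distrib,
    Finset.sum_add_distrib]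
  rw [← List.sum_toFinset _ hreg]
  have e1 : ∀ p ∈ reg.toFinset, cellCnt hh ww g p
      = (if InRect hh ww (p.1 + -1) (p.2 + 0) ∧ pvGet g (p.1 + -1) (p.2 + 0) = 1 then (1 : Int) else 0)
        + ((if InRect hh ww (p.1 + 1) (p.2 + 0) ∧ pvGet g (p.1 + 1) (p.2 + 0) = 1 then (1 : Int) else 0)
        + ((if InRect hh ww (p.1 + 0) (p.2 + -1) ∧ pvGet g (p.1 + 0) (p.2 + -1) = 1 then (1 : Int) else 0)
        + (if InRect hh ww (p.1 + 0) (p.2 + 1) ∧ pvGet g (p.1 + 0) (p.2 + 1) = 1 then (1 : Int) else 0))) := by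
    intro p _
    simp [cellCnt, pvOffsets]
  rw [Finset.sum_congr rfl e1, Finset.sum_add_distrib, Finset.sum_add_distrib,
    Finset.sum_add_distrib]
  rw [swap_sum hh ww g reg (-1) 0, swap_sum hh ww g reg 1 0,
    swap_sum hh ww g reg 0 (-1), swap_sum hh ww g reg 0 1]
  simp only [sub_neg_eq_add, sub_zero]
  ring

-- ===== VERDICT (by name: the statement is the Claim_ definition above) =====
theorem iterate_sea_tiles_spec : Claim_equal_iterate_sea_tiles := by
  intro g0 _hdom hpre
  obtain ⟨hne, hw0, hrows⟩ := hpre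
  unfold Spec_iterate_sea_tiles
  have hh0 : 0 < g0.length := List.length_pos_iff.2 hne
  have hshape : Shape g0.length (pvW g0) g0 := ⟨hh0, hw0, rfl, rfl, hrows⟩
  have hin00 : InRect g0.length (pvW g0) 0 0 := by
    refine ⟨le_refl 0, ?_, le_refl 0, ?_⟩ <;> omega
  have hsh1 : Shape g0.length (pvW g0) (pvSet2 g0 0 0) := shape_set _ _ g0 0 0 hshape
  have hinv1 : FillInv g0.length (pvW g0) (pvSet2 g0 0 0)
      ((pvNbrs 0 0).foldl (stepB (pvSet2 g0 0 0)) []) := by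
    refine ⟨hsh1, stepB_fold_nodup _ _ _ List.nodup_nil, ?_⟩
    intro q hq
    rcases stepB_fold_mem _ _ _ _ hq with hq0 | ⟨hir, hv⟩
    · simp at hq0
    · rw [hsh1.2.2.1, hsh1.2.2.2.1] at hir
      exact ⟨hir, hv⟩
  have hval2 : pvGet (pvSet2 g0 0 0) 0 0 = 2 := pvGet_set_self _ _ g0 0 0 hshape hin00
  -- unfold the first iteration of A's loop by hand (the initial worklist {(0,0)} may hold a
  -- non-sea cell, so the steady invariant only holds from here on)
  have hA1 : iterate_sea_tiles g0 =
      loopA (2 * g0.length * pvW g0 + 1) (pvSet2 g0 0 0)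
        (pvOffsets.foldl (stepA (pvSet2 g0 0 0) 0 0) ([], 0)).1
        (pvOffsets.foldl (stepA (pvSet2 g0 0 0) 0 0) ([], 0)).2 := rfl
  have hB1 : loopB (2 * g0.length * pvW g0 + 2) g0 [(0, 0)] [] =
      ((loopB (2 * g0.length * pvW g0 + 1) (pvSet2 g0 0 0)
          ((pvNbrs 0 0).foldl (stepB (pvSet2 g0 0 0)) []) []).1,
        (0, 0) :: (loopB (2 * g0.length * pvW g0 + 1) (pvSet2 g0 0 0)
          ((pvNbrs 0 0).foldl (stepB (pvSet2 g0 0 0)) []) []).2) := by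
    have he : loopB (2 * g0.length * pvW g0 + 2) g0 [(0, 0)] [] =
        loopB (2 * g0.length * pvW g0 + 1) (pvSet2 g0 0 0)
          ((pvNbrs 0 0).foldl (stepB (pvSet2 g0 0 0)) []) ([] ++ [(0, 0)]) := rfl
    rw [he, loopB_acc]
    simp
  have hnotin : (0, 0) ∉ (loopB (2 * g0.length * pvW g0 + 1) (pvSet2 g0 0 0)
      ((pvNbrs 0 0).foldl (stepB (pvSet2 g0 0 0)) []) []).2 := by
    intro hm
    obtain ⟨_, hrest⟩ := popped_mem _ _ _ _ _ hinv1 _ hm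
    rcases hrest with hqs | hv
    · have := (hinv1.2.2 _ hqs).2
      rw [hval2] at this
      omega
    · rw [hval2] at hv
      omega
  have hnd : ((0, 0) :: (loopB (2 * g0.length * pvW g0 + 1) (pvSet2 g0 0 0)
      ((pvNbrs 0 0).foldl (stepB (pvSet2 g0 0 0)) []) []).2).Nodup :=
    List.nodup_cons.2 ⟨hnotin, popped_nodup _ _ _ _ _ hinv1⟩
  have halt : iterate_sea_tiles_alt g0 = scanB g0.length (pvW g0)
      (loopB (2 * g0.length * pvW g0 + 1) (pvSet2 g0 0 0)
        ((pvNbrs 0 0).foldl (stepB (pvSet2 g0 0 0)) []) []).1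
      ((0, 0) :: (loopB (2 * g0.length * pvW g0 + 1) (pvSet2 g0 0 0)
        ((pvNbrs 0 0).foldl (stepB (pvSet2 g0 0 0)) []) []).2) := by
    unfold iterate_sea_tiles_alt
    rw [hB1]
  rw [hA1, fold_fst, fold_snd _ _ _ 0 0 _ hsh1,
    simA _ _ _ _ _ _ hinv1, halt,
    ← double_count _ _ _ _ hnd,
    cellCnt_stable _ _ (2 * g0.length * pvW g0 + 1) _ _ hinv1 (0, 0),
    List.map_cons, List.sum_cons]
  dsimp only
  ring
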